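-- pv_equiv track=rewrite | github.com/the-loudspeaker/mptcp-perf | appconf.py | splitSizestr
-- ===== SOURCE A (Python) =====
-- def splitSizestr(humanstr):
-- 	upperHumanstr = humanstr.upper()
-- 	sizestr = ""
-- 	unit = ""
--
-- 	for c in humanstr:
-- 		if c.isdigit():
-- 			sizestr = sizestr + c
-- 		else:
-- 			unit = c
-- 			break
--
-- 	return sizestr, unit
-- ===== SOURCE B (Python) =====
-- def splitSizestr(humanstr):
--     idx = next((i for i, c in enumerate(humanstr) if not c.isdigit()), None)
--     if idx is None:
--         return humanstr, ""
--     return humanstr[:idx], humanstr[idx]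
-- ===== Notes on version B (the rewrite author's own statement) =====
-- stated objective: simpler
-- what changed: Replaces the character-accumulating loop with a break by a scan for the first non-digit index followed by direct slicing of the input string.
import Mathlib
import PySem

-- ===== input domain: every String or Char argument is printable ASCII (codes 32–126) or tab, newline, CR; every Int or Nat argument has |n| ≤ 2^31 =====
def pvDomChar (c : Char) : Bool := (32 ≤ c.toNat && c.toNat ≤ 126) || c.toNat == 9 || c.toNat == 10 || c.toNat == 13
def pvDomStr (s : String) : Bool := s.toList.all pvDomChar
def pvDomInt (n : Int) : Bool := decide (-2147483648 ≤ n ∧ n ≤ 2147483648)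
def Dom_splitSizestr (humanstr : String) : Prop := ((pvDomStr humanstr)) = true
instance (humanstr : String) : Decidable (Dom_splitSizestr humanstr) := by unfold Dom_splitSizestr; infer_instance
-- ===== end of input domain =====

-- B replaces A's accumulate-and-break loop by an index scan plus slicing (objective: simpler).

-- ===== PORT A =====
-- A's for-loop with break: state (sizestr, unit); stops at the first non-digit.
def splitSizestrLoop : List Char → List Char → List Char × List Char
  | [], sizestr => (sizestr, [])
  | c :: cs, sizestr =>
      if PySem.Chars.isdigit c then splitSizestrLoop cs (sizestr ++ [c])
      else (sizestr, [c])

def splitSizestr (humanstr : String) : String × String :=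
  let p := splitSizestrLoop humanstr.toList []
  (String.ofList p.1, String.ofList p.2)

-- ===== PORT B =====
def splitSizestr_alt (humanstr : String) : String × String :=
  let l := humanstr.toList
  match List.findIdx? (fun c => !(PySem.Chars.isdigit c)) l with
  | none => (humanstr, "")
  | some i =>
      (String.ofList (PySem.List.slice l none (some (i : Int))),
       match PySem.List.pyGet? l (i : Int) with
       | some c => String.ofList [c]
       | none => "")

-- ===== PRECONDITION & SPEC =====
def Spec_splitSizestr (humanstr : String) (out : String × String) : Prop := out = splitSizestr_alt humanstr
instance (humanstr : String) (out : String × String) : Decidable (Spec_splitSizestr humanstr out) := by unfold Spec_splitSizestr; infer_instance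

-- ===== CLAIM (what is proved, stated in full; the proofs are below) =====
def Claim_equal_splitSizestr : Prop := ∀ (humanstr : String), Dom_splitSizestr humanstr → Spec_splitSizestr humanstr (splitSizestr humanstr)

-- ===== LEMMAS AND PROOFS =====
theorem splitSizestrLoop_eq (l : List Char) : ∀ (acc : List Char),
    splitSizestrLoop l acc =
      match List.findIdx? (fun c => !(PySem.Chars.isdigit c)) l with
      | none => (acc ++ l, [])
      | some i => (acc ++ l.take i, (l.drop i).take 1) := by
  induction l with
  | nil => intro acc; simp [splitSizestrLoop]
  | cons c cs ih =>
      intro acc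
      by_cases hc : PySem.Chars.isdigit c
      · rw [splitSizestrLoop, if_pos hc, ih]
        rw [List.findIdx?_cons]
        simp only [hc, Bool.not_true, if_neg Bool.false_ne_true]
        cases h : List.findIdx? (fun c => !(PySem.Chars.isdigit c)) cs with
        | none => simp
        | some i => simp
      · rw [splitSizestrLoop, if_neg hc]
        rw [List.findIdx?_cons]
        simp only [Bool.not_eq_true] at hc
        simp [hc]

-- ===== VERDICT (by name: the statement is the Claim_ definition above) =====
theorem splitSizestr_spec : Claim_equal_splitSizestr := by
  intro h _
  show splitSizestr h = splitSizestr_alt h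
  unfold splitSizestr splitSizestr_alt
  simp only []
  rw [splitSizestrLoop_eq]
  cases hf : List.findIdx? (fun c => !(PySem.Chars.isdigit c)) h.toList with
  | none => simp
  | some i =>
      have hi : i < h.toList.length := (List.findIdx?_eq_some_iff_findIdx_eq.mp hf).1
      simp only [PySem.List.pyGet?_natCast, List.getElem?_eq_getElem hi,
        List.drop_eq_getElem_cons hi, PySem.List.slice_to_natCast, List.nil_append,
        List.take_succ_cons, List.take_zero]
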